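-- pv_equiv track=rewrite | github.com/EpowerxAI/ViteosModel | OakTree - Pratik Code/Final Testing on Unseen data -Weiss - Phase 2 (OTM, MTM).py | desc_any_string_check
-- ===== SOURCE A (Python) =====
-- def desc_any_string_check(text1, text2):
--     match = 0
--     match2 = 0
--     text1 = text1.replace('interest','loan')
--     text1 = text1.replace('principal','loan')
--     text1 = text1.split(" ")
--     text2 = text2.split(" ")
--     for i in text1:
--         for j in text2:
--             if i in j and len(i)>1 and len(j)>1:
--                 match = 1
--                 break
--     for i in text2:
--         for j in text1:
--             if i in j and len(i)>1 and len(j)>1: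
--                 match2 = 1
--                 break
--     if match==0 and match2==0:
--         return 0
--     else:
--         return 1
-- ===== SOURCE B (Python) =====
-- def desc_any_string_check(text1, text2):
--     words1 = text1.replace('interest', 'loan').replace('principal', 'loan').split(" ")
--     words2 = text2.split(" ")
--     for a in words1:
--         for b in words2:
--             if len(a) > 1 and len(b) > 1 and (a in b or b in a):
--                 return 1
--     return 0
-- ===== Notes on version B (the rewrite author's own statement) =====
-- stated objective: alternative
-- what changed: Replaces A's two separate symmetric double loops with flag variables by a single nested pass over (word1, word2) pairs testing the combined condition len>1 on both and (a in b or b in a), returning 1 on the first hit.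
import Mathlib
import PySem

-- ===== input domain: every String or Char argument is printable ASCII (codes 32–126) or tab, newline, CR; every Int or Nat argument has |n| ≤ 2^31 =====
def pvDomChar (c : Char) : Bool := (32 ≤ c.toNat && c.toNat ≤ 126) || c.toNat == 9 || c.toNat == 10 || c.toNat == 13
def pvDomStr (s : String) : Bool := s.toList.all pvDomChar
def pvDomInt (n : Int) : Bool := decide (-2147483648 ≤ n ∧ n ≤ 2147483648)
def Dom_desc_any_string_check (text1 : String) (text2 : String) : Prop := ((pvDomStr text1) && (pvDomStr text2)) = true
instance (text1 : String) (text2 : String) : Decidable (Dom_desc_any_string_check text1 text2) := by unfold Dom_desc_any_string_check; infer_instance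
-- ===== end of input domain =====

-- B fuses A's two symmetric flag-setting double loops into one nested pass with an
-- early return on the combined condition (a in b or b in a); alternative decomposition, same cost.

-- ===== PORT A =====
-- inner 'for j in text2: if i in j and len(i)>1 and len(j)>1: match = 1; break' — break = stop at first hit
def pvInnerA (i : String) (t2 : List String) (m : Int) : Int :=
  match t2 with
  | [] => m
  | j :: rest =>
      if PySem.Str.isIn i j && decide (1 < PySem.Str.len i) && decide (1 < PySem.Str.len j) then 1
      else pvInnerA i rest m

-- outer 'for i in text1: …' threading the flag
def pvOuterA : List String → List String → Int → Int
  | [], _, m => m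
  | i :: rest, t2, m => pvOuterA rest t2 (pvInnerA i t2 m)

def desc_any_string_check (text1 : String) (text2 : String) : Int :=
  let text1' := PySem.Str.replace text1 "interest" "loan"
  let text1'' := PySem.Str.replace text1' "principal" "loan"
  -- split(" "): sep is the non-empty literal " ", so split? is always some; .getD [] is exact
  let t1 := (PySem.Str.split? text1'' " ").getD []
  let t2 := (PySem.Str.split? text2 " ").getD []
  let m := pvOuterA t1 t2 0
  let m2 := pvOuterA t2 t1 0
  if m = 0 ∧ m2 = 0 then 0 else 1

-- ===== PORT B =====
-- 'for b in words2: if len(a)>1 and len(b)>1 and (a in b or b in a): return 1'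
def pvInnerB (a : String) (ws2 : List String) : Bool :=
  match ws2 with
  | [] => false
  | b :: rest =>
      if decide (1 < PySem.Str.len a) && decide (1 < PySem.Str.len b)
         && (PySem.Str.isIn a b || PySem.Str.isIn b a) then true
      else pvInnerB a rest

def pvOuterB (ws1 ws2 : List String) : Int :=
  match ws1 with
  | [] => 0
  | a :: rest => if pvInnerB a ws2 then 1 else pvOuterB rest ws2

def desc_any_string_check_alt (text1 : String) (text2 : String) : Int :=
  let words1 := (PySem.Str.split? (PySem.Str.replace (PySem.Str.replace text1 "interest" "loan") "principal" "loan") " ").getD []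
  let words2 := (PySem.Str.split? text2 " ").getD []
  pvOuterB words1 words2

-- ===== PRECONDITION & SPEC =====
def Spec_desc_any_string_check (text1 : String) (text2 : String) (out : Int) : Prop := out = desc_any_string_check_alt text1 text2
instance (text1 : String) (text2 : String) (out : Int) : Decidable (Spec_desc_any_string_check text1 text2 out) := by unfold Spec_desc_any_string_check; infer_instance

-- ===== CLAIM (what is proved, stated in full; the proofs are below) =====
def Claim_equal_desc_any_string_check : Prop := ∀ (text1 : String) (text2 : String), Dom_desc_any_string_check text1 text2 → Spec_desc_any_string_check text1 text2 (desc_any_string_check text1 text2)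

-- ===== LEMMAS AND PROOFS =====

lemma pvIfOr (b c : Bool) (m : Int) :
    (if b then (1:Int) else if c then 1 else m) = (if (b || c) then 1 else m) := by
  cases b <;> cases c <;> simp

lemma pvIfOr' (b c : Bool) (m : Int) :
    (if c then (1:Int) else if b then 1 else m) = (if (b || c) then 1 else m) := by
  cases b <;> cases c <;> simp

lemma pvIfTrue (b c : Bool) : (if b then true else c) = (b || c) := by
  cases b <;> simp

def pvHit (i j : String) : Bool :=
  PySem.Str.isIn i j && decide (1 < PySem.Str.len i) && decide (1 < PySem.Str.len j)

lemma pvInnerA_eq (i : String) (t2 : List String) (m : Int) :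
    pvInnerA i t2 m = if t2.any (fun j => pvHit i j) then 1 else m := by
  induction t2 with
  | nil => simp [pvInnerA]
  | cons j rest ih =>
      have hc : (PySem.Str.isIn i j && decide (1 < PySem.Str.len i) && decide (1 < PySem.Str.len j)) = pvHit i j := rfl
      simp only [pvInnerA, hc, List.any_cons, ih, pvIfOr]
      rfl

lemma pvOuterA_eq (t1 t2 : List String) (m : Int) :
    pvOuterA t1 t2 m = if t1.any (fun i => t2.any (fun j => pvHit i j)) then 1 else m := by
  induction t1 generalizing m with
  | nil => simp [pvOuterA]
  | cons i rest ih =>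
      simp only [pvOuterA, List.any_cons, ih, pvInnerA_eq, pvIfOr']
      rfl

lemma pvBoolMerge (p q x y : Bool) : (x && y && (p || q)) = (p && x && y || q && y && x) := by
  cases p <;> cases q <;> cases x <;> cases y <;> rfl

lemma pvInnerB_eq (a : String) (ws2 : List String) :
    pvInnerB a ws2 = ws2.any (fun b => pvHit a b || pvHit b a) := by
  induction ws2 with
  | nil => simp [pvInnerB]
  | cons b rest ih =>
      have hc : (decide (1 < PySem.Str.len a) && decide (1 < PySem.Str.len b)
          && (PySem.Str.isIn a b || PySem.Str.isIn b a)) = (pvHit a b || pvHit b a) := by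
        simp only [pvHit]
        exact pvBoolMerge (PySem.Str.isIn a b) (PySem.Str.isIn b a)
          (decide (1 < PySem.Str.len a)) (decide (1 < PySem.Str.len b))
      simp only [pvInnerB, hc, List.any_cons, ih, pvIfTrue]

lemma pvOuterB_eq (ws1 ws2 : List String) :
    pvOuterB ws1 ws2 = if ws1.any (fun a => ws2.any (fun b => pvHit a b || pvHit b a)) then 1 else 0 := by
  induction ws1 with
  | nil => simp [pvOuterB]
  | cons a rest ih =>
      simp only [pvOuterB, pvInnerB_eq, List.any_cons, ih, pvIfOr]
      rfl

lemma pvAny_merge (t1 t2 : List String) :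
    (t1.any (fun a => t2.any (fun b => pvHit a b || pvHit b a)))
      = (t1.any (fun i => t2.any (fun j => pvHit i j)) || t2.any (fun i => t1.any (fun j => pvHit i j))) := by
  apply Bool.eq_iff_iff.mpr
  simp only [List.any_eq_true, Bool.or_eq_true]
  constructor
  · rintro ⟨a, ha, b, hb, hab⟩
    rcases hab with h | h
    · exact Or.inl ⟨a, ha, b, hb, h⟩
    · exact Or.inr ⟨b, hb, a, ha, h⟩
  · rintro (⟨a, ha, b, hb, h⟩ | ⟨b, hb, a, ha, h⟩)
    · exact ⟨a, ha, b, hb, by simp [h]⟩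
    · exact ⟨a, ha, b, hb, by simp [h]⟩

-- ===== VERDICT (by name: the statement is the Claim_ definition above) =====
lemma pvFinal (X Y : Bool) :
    (if ((if X then (1:Int) else 0) = 0 ∧ (if Y then (1:Int) else 0) = 0) then (0:Int) else 1)
      = if (X || Y) then 1 else 0 := by
  cases X <;> cases Y <;> simp

theorem desc_any_string_check_spec : Claim_equal_desc_any_string_check := by
  intro text1 text2 _
  unfold Spec_desc_any_string_check desc_any_string_check desc_any_string_check_alt
  simp only [pvOuterA_eq, pvOuterB_eq, pvAny_merge, pvFinal]
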